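/-
  THE TEMP-MEMORY ESTIMATE: T1 (`temp_memory_required` = the corrected estimate: per-residue type-2 actual_size, FIX 9) and T3
  (every decode-time request is at most that value) of design/INVARIANTS.md §2, over the decoder's memory. The arithmetic is in
  Vorbis/ResidueMapping/Arith.lean (`Res.partRead_mono`, `Res.T3_request`, `Res.final_test` for ARENA-FIX 1's `+ 2*ARENA_REDZONE`).
-/
import Vorbis.ResidueMapping.Mapping
namespace Vorbis
open X86 X86.User Asan

/-! ### part_read of a record, as the estimate and as decode_residue compute it -/

/-- `PR(r, A)` for the record at `r`: `(min(r.end, A) − min(r.begin, A)) / r.part_size`. -/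
def Residue.partRead (mem : Mem) (r A : Nat) : Nat :=
  Res.partRead (Residue.begin mem r) (Residue.end_ mem r) (Residue.part_size mem r) A

/-- **The estimate's `part_read` of residue `i`** (start_decoder.R18): `PR(r_i, A_i)` with
`A_i = residue_types[i] == 2 ? b1 : b1 / 2` (FIX 9), `b1 = bsize mem f 1` (Vorbis/Blocks.lean). -/
def Residue.partReadEst (mem : Mem) (f i : Nat) : Nat :=
  Residue.partRead mem (stb_vorbis.residue_config_at mem f i)
    (Res.actualEst (stb_vorbis.residue_types mem f i) (bsize mem f 1))

/-- **decode_residue's `part_read`** for residue `rn` and its 4th argument `n`: `PR(r_rn, rtype == 2 ? 2n : n)`. -/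
def Residue.partReadDec (mem : Mem) (f rn n : Nat) : Nat :=
  Residue.partRead mem (stb_vorbis.residue_config_at mem f rn) (Res.actualDec (stb_vorbis.residue_types mem f rn) n)

/-- `max_part_read` at the head of the estimate loop 4189 with counter `i`: `P_i` (CONTRACTS, loop 0x11604f). -/
def maxPartRead (mem : Mem) (f i : Nat) : Nat := Res.maxUpTo (Residue.partReadEst mem f) i

/-- One turn of the estimate loop (start_decoder.R18): `P_{i+1} = max(P_i, PR(r_i, A_i))`. -/
theorem maxPartRead_succ (mem : Mem) (f i : Nat) :
    maxPartRead mem f (i + 1) = max (maxPartRead mem f i) (Residue.partReadEst mem f i) := id rfl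

/-- Before the loop: `max_part_read = 0`. -/
theorem maxPartRead_zero (mem : Mem) (f : Nat) : maxPartRead mem f 0 = 0 := id rfl

/-- `P_i ≤ blocksize_1` (≤ 8192: the 32-bit `(P+1)·C·8` does not wrap). -/
theorem maxPartRead_le (mem : Mem) (f i : Nat) : maxPartRead mem f i ≤ bsize mem f 1 := by
  apply Res.maxUpTo_le
  intro j _
  unfold Residue.partReadEst Residue.partRead
  have h1 := Res.partRead_le (Residue.begin mem (stb_vorbis.residue_config_at mem f j))
    (Residue.end_ mem (stb_vorbis.residue_config_at mem f j)) (Residue.part_size mem (stb_vorbis.residue_config_at mem f j))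
    (Res.actualEst (stb_vorbis.residue_types mem f j) (bsize mem f 1))
  have h2 : Res.actualEst (stb_vorbis.residue_types mem f j) (bsize mem f 1) ≤ bsize mem f 1 := by
    unfold Res.actualEst
    split <;> omega
  omega

/-! ### T1 -/

/-- **T1** (the group TempOK): `temp_memory_required = max(8·C·(P+1), 2·b1)` with `P = max_{i < residue_count} PR(r_i, A_i)`
(FIX 9 in `A_i`), `C = nchan mem f`, `b1 = bsize mem f 1`. Established by start_decoder 4185–4210 (segments R15, R17, R18);
relied on by T3. -/
def T1 (mem : Mem) (f : Nat) : Prop :=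
  stb_vorbis.temp_memory_required mem f =
    Res.tempRequired (nchan mem f) (maxPartRead mem f (stb_vorbis.residue_count mem f).toNat) (bsize mem f 1)

/-- ADO's `tmr % 8 = 0`, from T1 and HD3 (`blocksize_1` is a multiple of 4). -/
theorem T1.mod8 {mem : Mem} {f : Nat} (h : T1 mem f) (hb : bsize mem f 1 % 4 = 0) :
    stb_vorbis.temp_memory_required mem f % 8 = 0 := by
  rw [h]
  exact Res.tempRequired_mod8 _ _ _ hb

/-- T1's value is at most 1 048 704 (HD1: `C ≤ 16`; HD3: `b1 ≤ 8192`). -/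
theorem T1.le {mem : Mem} {f : Nat} (h : T1 mem f) (hC : nchan mem f ≤ 16) (hb : bsize mem f 1 ≤ 8192) :
    stb_vorbis.temp_memory_required mem f ≤ 1048704 := by
  rw [h]
  have hP := maxPartRead_le mem f (stb_vorbis.residue_count mem f).toNat
  exact Res.tempRequired_le hC (by omega) hb

/-! ### T3 -/

/-- **T3, decode_residue**: for `rn < residue_count` and `n ∈ {b0/2, b1/2}` (so `2·n ≤ b1`) the request
`C·(8 + 8·part_read)` of `temp_block_array` is at most `temp_memory_required`. Needs R4 of record `rn` (monotonicity of `PR`).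
With ADO (`temp_alloc_ok`, Vorbis/Arena.lean) the unchecked allocation succeeds. -/
theorem T3_decode_residue {Blk : Block → Prop} {mem : Mem} {f : Nat} (hT1 : T1 mem f) (hR : ResidueOK Blk mem f) {rn n : Nat}
    (hrn : (rn : Int) < stb_vorbis.residue_count mem f) (hn : 2 * n ≤ bsize mem f 1) :
    nchan mem f * (8 + 8 * Residue.partReadDec mem f rn n) ≤ stb_vorbis.temp_memory_required mem f := by
  rw [hT1]
  have h1 := hR.R1
  have h4 := hR.R4 rn hrn
  exact Res.T3_request (fun i => Residue.begin mem (stb_vorbis.residue_config_at mem f i))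
    (fun i => Residue.end_ mem (stb_vorbis.residue_config_at mem f i))
    (fun i => Residue.part_size mem (stb_vorbis.residue_config_at mem f i)) (fun i => stb_vorbis.residue_types mem f i)
    (by omega) h4.1 hn

/-- **T3, inverse_mdct**: its request `2·n` with `n ≤ blocksize_1`. -/
theorem T3_inverse_mdct {mem : Mem} {f : Nat} (hT1 : T1 mem f) {n : Nat} (hn : n ≤ bsize mem f 1) :
    2 * n ≤ stb_vorbis.temp_memory_required mem f := by
  rw [hT1]
  exact Res.mdct_request_le hn

/-- decode_residue's `part_read ≤ actual_size ≤ 2·n`. -/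
theorem Residue.partReadDec_le (mem : Mem) (f rn n : Nat) : Residue.partReadDec mem f rn n ≤ 2 * n := by
  unfold Residue.partReadDec Residue.partRead
  have h1 := Res.partRead_le (Residue.begin mem (stb_vorbis.residue_config_at mem f rn))
    (Residue.end_ mem (stb_vorbis.residue_config_at mem f rn)) (Residue.part_size mem (stb_vorbis.residue_config_at mem f rn))
    (Res.actualDec (stb_vorbis.residue_types mem f rn) n)
  have h2 := Res.actualDec_le (stb_vorbis.residue_types mem f rn) n
  omega

/-! ### FRAME of T1 -/

/-- **The windows of `*f` that T1 reads**: `channels` `[4, 8)`, `temp_memory_required` `[12, 16)`, `blocksize_1` `[156, 160)`,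
the residue fields `residue_count`, `residue_types[64]`, `residue_config` `[320, 464)`. -/
def T1.wins : Wins := [(4, 8), (12, 16), (156, 160), (320, 464)]

/-- `T1.wins` in field names (fails when the layout changes). -/
example : T1.wins = [(Off.stb_vorbis.channels, Off.stb_vorbis.channels + 4),
    (Off.stb_vorbis.temp_memory_required, Off.stb_vorbis.temp_memory_required + 4),
    (Off.stb_vorbis.blocksize_1, Off.stb_vorbis.blocksize_1 + 4),
    (Off.stb_vorbis.residue_count, Off.stb_vorbis.mapping_count)] := by
  simp only [T1.wins, voff]

/-- **The block whose CONTENT T1 reads**: the `residue_config` block (`begin`, `end`, `part_size` of every record). It is OWNED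
by the residue group (R2: `T1.Reads.owned`), not by this one; T1 owns no block. -/
inductive T1.Reads (mem : Mem) (f : Nat) : Block → Prop
  /-- `Block(residue_config, 32·residue_count)` -/
  | config : T1.Reads mem f ⟨stb_vorbis.residue_config mem f, Off.sizeof.Residue * (stb_vorbis.residue_count mem f).toNat⟩

/-- What T1 reads is a block that `ResidueOK` owns (so it is allocated: `ResidueOK.owns_blk`). -/
theorem T1.Reads.owned {mem : Mem} {f : Nat} {B : Block} (h : T1.Reads mem f B) : ResidueOK.Owns mem f B := by
  cases h with
  | config => exact ResidueOK.Owns.config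

/-- **THE TWO-ADDRESS FRAME LEMMA OF T1**: the windows `T1.wins` of the object at `f` in `mem'` read as those of the object
at `p` in `mem`, and the `residue_config` block is kept. `h1` is R1's upper bound about `(mem, p)`, a fact of the residue group
(`hR.R1.2`): it puts `residue_types[i]`, `i < residue_count`, inside the window. -/
theorem T1.transfer {mem mem' : Mem} {p f : Nat} (h : T1 mem p) (he : ObjEq T1.wins mem p mem' f)
    (h1 : stb_vorbis.residue_count mem p ≤ 64) (hk : ∀ B, T1.Reads mem p B → B.Kept mem mem') : T1 mem' f := by
  have htmr : stb_vorbis.temp_memory_required mem' f = stb_vorbis.temp_memory_required mem p := by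
    simp only [vacc, voff]
    exact he.u32 12 (by decide)
  have hC : stb_vorbis.channels mem' f = stb_vorbis.channels mem p := by
    simp only [vacc, voff]
    exact he.i32 4 (by decide)
  have hb1 : stb_vorbis.blocksize_1 mem' f = stb_vorbis.blocksize_1 mem p := by
    simp only [vacc, voff]
    exact he.i32 156 (by decide)
  have ecount : stb_vorbis.residue_count mem' f = stb_vorbis.residue_count mem p := by
    simp only [vacc, voff]
    exact he.i32 320 (by decide)
  have econf : stb_vorbis.residue_config mem' f = stb_vorbis.residue_config mem p := by
    simp only [vacc, voff]
    exact he.u64 456 (by decide)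
  have eb1 : bsize mem' f 1 = bsize mem p 1 := by
    rw [bsize_one, bsize_one, hb1]
  have eC : nchan mem' f = nchan mem p := by
    rw [nchan_def, nchan_def, hC]
  have hconf := hk _ T1.Reads.config
  have eP : maxPartRead mem' f (stb_vorbis.residue_count mem p).toNat
      = maxPartRead mem p (stb_vorbis.residue_count mem p).toNat := by
    apply Res.maxUpTo_congr
    intro i hi
    have et : stb_vorbis.residue_types mem' f i = stb_vorbis.residue_types mem p i := by
      simp only [vacc, voff]
      have hw : InWins T1.wins (324 + 2 * i) 2 := by
        apply InWins.of_mem (320, 464) (by decide)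
        · show 320 ≤ 324 + 2 * i
          omega
        · show 324 + 2 * i + 2 ≤ 464
          omega
      exact he.u16_at (324 + 2 * i) hw (by omega) (by omega)
    have eat : stb_vorbis.residue_config_at mem' f i = stb_vorbis.residue_config_at mem p i := by
      unfold stb_vorbis.residue_config_at
      rw [econf]
    have hr : (Block.mk (stb_vorbis.residue_config_at mem p i) Off.sizeof.Residue).Kept mem mem' := by
      apply hconf.mono
      · simp only [vacc, voff]
        omega
      · simp only [vacc, voff] at hi ⊢
        omega
    have eb : Residue.begin mem' (stb_vorbis.residue_config_at mem p i)
        = Residue.begin mem (stb_vorbis.residue_config_at mem p i) := by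
      simp only [Residue.begin, voff]
      exact hr.u32 _ (by simp only []; omega) (by simp only [voff]; omega)
    have ee : Residue.end_ mem' (stb_vorbis.residue_config_at mem p i)
        = Residue.end_ mem (stb_vorbis.residue_config_at mem p i) := by
      simp only [Residue.end_, voff]
      exact hr.u32 _ (by simp only []; omega) (by simp only [voff]; omega)
    have ep : Residue.part_size mem' (stb_vorbis.residue_config_at mem p i)
        = Residue.part_size mem (stb_vorbis.residue_config_at mem p i) := by
      simp only [Residue.part_size, voff]
      exact hr.u32 _ (by simp only []; omega) (by simp only [voff]; omega)
    unfold Residue.partReadEst Residue.partRead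
    rw [eat, eb, ee, ep, et, eb1]
  unfold T1
  rw [htmr, eC, ecount, eb1, eP]
  exact h

/-- **FRAME of T1** (same address): `ObjSame` is what every allocator call and every store outside `*f` leaves of the object. -/
theorem T1.frame {mem mem' : Mem} {f : Nat} (h : T1 mem f) (hs : ObjSame f mem mem')
    (h1 : stb_vorbis.residue_count mem f ≤ 64) (hk : ∀ B, T1.Reads mem f B → B.Kept mem mem') : T1 mem' f :=
  h.transfer (hs.sub (by decide)) h1 hk

/-! ### Establishing T1 (start_decoder.R17) -/

/-- **The exit of the estimate loop**: the loop ends with `max_part_read = P` (its invariant at `i = residue_count`), then stores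
`max(((P+1)·C) << 3, 2·b1)`. `v` is the value stored at `f+12`. -/
theorem T1.of_loop {mem : Mem} {f : Nat}
    (hv : stb_vorbis.temp_memory_required mem f =
      max ((maxPartRead mem f (stb_vorbis.residue_count mem f).toNat + 1) * nchan mem f * 8)
        (2 * bsize mem f 1)) : T1 mem f := by
  unfold T1 Res.tempRequired
  rw [hv, Res.classify_eq]

end Vorbis
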